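-- pv_equiv track=rewrite | github.com/nascarsayan/lintcode | 1399.py | takeCoins
-- ===== SOURCE A (Python) =====
-- def takeCoins(coins, k):
--   # Write your code here
--   tot = sum(coins)
--   size = len(coins)
--   nk = size - k
--   curr = 0
--   for i in range(nk):
--     curr += coins[i]
--   mn = curr
--   for i in range(size - nk):
--     curr += coins[i + nk] - coins[i]
--     mn = min(mn, curr)
--   return tot - mn
-- ===== SOURCE B (Python) =====
-- def takeCoins(coins, k):
--     prefix = [0]
--     for c in coins:
--         prefix.append(prefix[-1] + c)
--     n = len(coins)
--     total = prefix[n]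
--     return max(prefix[i] + (total - prefix[n - (k - i)]) for i in range(k + 1))
-- ===== Notes on version B (the rewrite author's own statement) =====
-- stated objective: alternative
-- what changed: B builds one prefix-sum table and maximizes left[i] + (total - prefix[n-(k-i)]) over the split point i in 0..k, instead of A's sliding window of size n-k that tracks the minimum window sum.
import Mathlib
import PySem

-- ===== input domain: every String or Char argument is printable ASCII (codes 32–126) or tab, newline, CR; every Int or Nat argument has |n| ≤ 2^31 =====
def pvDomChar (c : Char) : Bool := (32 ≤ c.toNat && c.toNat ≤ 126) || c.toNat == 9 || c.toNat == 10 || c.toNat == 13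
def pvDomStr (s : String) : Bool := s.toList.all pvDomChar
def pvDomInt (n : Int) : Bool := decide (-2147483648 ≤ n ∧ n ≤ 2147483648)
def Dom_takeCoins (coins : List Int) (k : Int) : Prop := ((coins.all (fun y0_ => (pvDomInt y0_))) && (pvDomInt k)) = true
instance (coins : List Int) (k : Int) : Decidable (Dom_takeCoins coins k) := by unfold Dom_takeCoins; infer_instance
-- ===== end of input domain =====

-- B replaces A's sliding window (tracking the minimum window sum) by a prefix-sum table and a
-- maximum over the front/back split point; equivalence is proved on 0 ≤ k ≤ len(coins).

-- ===== PORT A =====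
def takeCoins (coins : List Int) (k : Int) : Int :=
  let tot := coins.sum
  let size : Int := coins.length
  let nk := size - k
  let curr := (PySem.List.pyRange 0 nk 1).foldl (fun c i => c + PySem.List.pyGetD coins i 0) 0
  let st := (PySem.List.pyRange 0 (size - nk) 1).foldl
    (fun (p : Int × Int) i =>
      let c := p.1 + PySem.List.pyGetD coins (i + nk) 0 - PySem.List.pyGetD coins i 0
      (c, min p.2 c)) (curr, curr)
  tot - st.2

-- ===== PORT B =====
def takeCoins_alt (coins : List Int) (k : Int) : Int :=
  let pre := coins.foldl (fun (l : List Int) c => l ++ [PySem.List.pyGetD l (-1) 0 + c]) [0]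
  let n : Int := coins.length
  let total := PySem.List.pyGetD pre n 0
  -- Python's max(...) over the nonempty generator; the `.getD 0` default is unreachable under Pre_
  (PySem.List.max? ((PySem.List.pyRange 0 (k + 1) 1).map
      (fun i => PySem.List.pyGetD pre i 0 + (total - PySem.List.pyGetD pre (n - (k - i)) 0))) id).getD 0

-- ===== PRECONDITION & SPEC =====
-- Outside 0 ≤ k ≤ len(coins) the Python A raises IndexError (and B raises too); no other input is excluded.
def Pre_takeCoins (coins : List Int) (k : Int) : Prop := 0 ≤ k ∧ k ≤ (coins.length : Int)
instance (coins : List Int) (k : Int) : Decidable (Pre_takeCoins coins k) := by unfold Pre_takeCoins; infer_instance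
def pvWitness_takeCoins : List Int × Int := ([1, 2, 3], 2)

def Spec_takeCoins (coins : List Int) (k : Int) (out : Int) : Prop := out = takeCoins_alt coins k
instance (coins : List Int) (k : Int) (out : Int) : Decidable (Spec_takeCoins coins k out) := by unfold Spec_takeCoins; infer_instance

-- ===== CLAIM (what is proved, stated in full; the proofs are below) =====
def Claim_equal_takeCoins : Prop := ∀ (coins : List Int) (k : Int), Dom_takeCoins coins k → Pre_takeCoins coins k → Spec_takeCoins coins k (takeCoins coins k)

-- ===== LEMMAS AND PROOFS =====

-- prefix sums of coins, as a function of the index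
def pvPref (coins : List Int) (m : Nat) : Int := (coins.take m).sum

-- sum of the window of length (n-k) starting at j
def pvW (coins : List Int) (nk j : Nat) : Int := pvPref coins (j + nk) - pvPref coins j

-- running minimum of the window sums W 0 .. W m
def pvMn (coins : List Int) (nk : Nat) : Nat → Int
  | 0 => pvW coins nk 0
  | m + 1 => min (pvMn coins nk m) (pvW coins nk (m + 1))

theorem pvPref_succ (coins : List Int) (m : Nat) :
    pvPref coins (m + 1) = pvPref coins m + coins.getD m 0 := by
  unfold pvPref
  rw [List.take_add_one]
  cases h : coins[m]? <;> simp [List.getD, h]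

theorem pvW_succ (coins : List Int) (nk m : Nat) :
    pvW coins nk (m + 1) = pvW coins nk m + coins.getD (m + nk) 0 - coins.getD m 0 := by
  unfold pvW
  rw [show m + 1 + nk = (m + nk) + 1 by omega, pvPref_succ, pvPref_succ]
  ring

theorem pvFoldAdd (coins : List Int) (m : Nat) (a : Int) :
    (List.range m).foldl (fun c j => c + coins.getD j 0) a = a + pvPref coins m := by
  induction m with
  | zero => simp [pvPref]
  | succ m ih =>
      rw [List.range_succ, List.foldl_append, ih, pvPref_succ]
      simp [add_assoc]

theorem pvFoldA (coins : List Int) (nk : Nat) (m : Nat) :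
    (List.range m).foldl
      (fun (p : Int × Int) j =>
        (p.1 + coins.getD (j + nk) 0 - coins.getD j 0,
         min p.2 (p.1 + coins.getD (j + nk) 0 - coins.getD j 0)))
      (pvW coins nk 0, pvW coins nk 0) = (pvW coins nk m, pvMn coins nk m) := by
  induction m with
  | zero => simp [pvMn]
  | succ m ih =>
      rw [List.range_succ, List.foldl_append, ih]
      simp only [List.foldl_cons, List.foldl_nil]
      rw [← pvW_succ]
      rfl

theorem takeCoins_eq (coins : List Int) (k : Int) (h0 : 0 ≤ k) (h1 : k ≤ (coins.length : Int)) :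
    takeCoins coins k = coins.sum - pvMn coins (coins.length - k.toNat) k.toNat := by
  obtain ⟨kn, rfl⟩ : ∃ kn : Nat, k = (kn : Int) := ⟨k.toNat, (Int.toNat_of_nonneg h0).symm⟩
  have hkn : kn ≤ coins.length := by exact_mod_cast h1
  simp only [takeCoins]
  rw [show (coins.length : Int) - (kn : Int) = ((coins.length - kn : Nat) : Int) by omega]
  rw [show (coins.length : Int) - ((coins.length - kn : Nat) : Int) = ((kn : Nat) : Int) by omega]
  rw [PySem.List.pyRange_zero_nat, PySem.List.pyRange_zero_nat, List.foldl_map, List.foldl_map]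
  simp only [← Nat.cast_add, PySem.List.pyGetD_natCast]
  rw [pvFoldAdd]
  rw [show (0 : Int) + pvPref coins (coins.length - kn) = pvW coins (coins.length - kn) 0 by
        simp [pvW, pvPref]]
  rw [pvFoldA coins (coins.length - kn) kn]
  simp

theorem pvBuild (xs : List Int) :
    xs.foldl (fun (l : List Int) c => l ++ [PySem.List.pyGetD l (-1) 0 + c]) [0]
      = (List.range (xs.length + 1)).map (fun j => pvPref xs j) := by
  induction xs using List.reverseRecOn with
  | nil => simp [pvPref]
  | append_singleton ys c ih =>
      rw [List.foldl_append, ih]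
      simp only [List.foldl_cons, List.foldl_nil]
      have hlast : PySem.List.pyGetD ((List.range (ys.length + 1)).map (fun j => pvPref ys j)) (-1) 0
          = pvPref ys ys.length := by
        rw [List.range_succ, List.map_append]
        simp [pysem]
      rw [hlast]
      rw [show (ys ++ [c]).length + 1 = (ys.length + 1) + 1 by simp]
      conv_rhs => rw [List.range_succ, List.map_append]
      congr 1
      · apply List.map_congr_left
        intro j hj
        have hj' : j ≤ ys.length := by
          have := List.mem_range.mp hj; omega
        simp [pvPref, List.take_append_of_le_length hj']
      · simp only [List.map_cons, List.map_nil]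
        have h1 : pvPref (ys ++ [c]) (ys.length + 1) = ys.sum + c := by
          rw [pvPref, List.take_of_length_le (by simp)]
          simp
        have h2 : pvPref ys ys.length = ys.sum := by
          rw [pvPref, List.take_of_length_le le_rfl]
        rw [h1, h2]

theorem pvMax (coins : List Int) (nk : Nat) (S : Int) (m : Nat) :
    PySem.List.max? ((List.range (m + 1)).map (fun j => S - pvW coins nk j)) id
      = some (S - pvMn coins nk m) := by
  induction m with
  | zero => simp [PySem.List.max?, pvMn]
  | succ m ih =>
      rw [show m + 1 + 1 = (m + 1) + 1 from rfl, List.range_succ, List.map_append]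
      simp only [PySem.List.max?] at ih ⊢
      rw [List.foldl_append, ih]
      simp only [List.map_cons, List.map_nil, List.foldl_cons, List.foldl_nil]
      dsimp only [id]
      rw [pvMn]
      split_ifs with h <;> (congr 1; omega)

theorem takeCoins_alt_eq (coins : List Int) (k : Int) (h0 : 0 ≤ k) (h1 : k ≤ (coins.length : Int)) :
    takeCoins_alt coins k = coins.sum - pvMn coins (coins.length - k.toNat) k.toNat := by
  obtain ⟨kn, rfl⟩ : ∃ kn : Nat, k = (kn : Int) := ⟨k.toNat, (Int.toNat_of_nonneg h0).symm⟩
  have hkn : kn ≤ coins.length := by exact_mod_cast h1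
  simp only [takeCoins_alt]
  rw [pvBuild]
  have htot : PySem.List.pyGetD ((List.range (coins.length + 1)).map (fun j => pvPref coins j))
      ((coins.length : Nat) : Int) 0 = coins.sum := by
    rw [PySem.List.pyGetD_natCast, PySem.List.getD_map_range _ _ _ _ (by omega)]
    simp [pvPref, List.take_of_length_le]
  rw [htot]
  rw [show (kn : Int) + 1 = ((kn + 1 : Nat) : Int) by push_cast; ring]
  rw [PySem.List.pyRange_zero_nat, List.map_map]
  rw [List.map_congr_left (g := fun j => coins.sum - pvW coins (coins.length - kn) j) ?_]
  · rw [pvMax coins (coins.length - kn) coins.sum kn]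
    simp
  · intro j hj
    have hj' : j ≤ kn := by have := List.mem_range.mp hj; omega
    simp only [Function.comp_apply]
    rw [PySem.List.pyGetD_natCast, PySem.List.getD_map_range _ _ _ _ (by omega)]
    rw [show (coins.length : Int) - ((kn : Int) - (j : Int)) = ((coins.length - kn + j : Nat) : Int) by
          push_cast [Nat.sub_add_comm]; omega]
    rw [PySem.List.pyGetD_natCast, PySem.List.getD_map_range _ _ _ _ (by omega)]
    unfold pvW
    rw [show j + (coins.length - kn) = coins.length - kn + j by omega]
    ring

-- ===== VERDICT (by name: the statement is the Claim_ definition above) =====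
theorem takeCoins_spec : Claim_equal_takeCoins := by
  intro coins k _ hpre
  unfold Spec_takeCoins
  rw [takeCoins_eq coins k hpre.1 hpre.2, takeCoins_alt_eq coins k hpre.1 hpre.2]
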